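-- pv_equiv track=rewrite | github.com/pecherkinakris/Python | ex3.py | double_f
-- ===== SOURCE A (Python) =====
-- def reverse(list1):
--     len_l = len(list1)
--     n_list = []
--     for i in range(len_l):
--         m = list1[len_l - 1 - i]
--         n_list.append(m)
--     return n_list
--
-- def double_f(n):
--     new_list = []
--     a = abs(n)
--     while a > 1:
--         b = a % 2
--         a = a // 2
--         new_list.append(b)
--     else:
--         new_list.append(a)
--     arr = reverse(new_list)
--     res = 0
--     for i in arr:
--         res = res * 10 + i
--     return res
-- ===== SOURCE B (Python) =====
-- def double_f(n):
--     def go(a):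
--         return a if a < 2 else go(a // 2) * 10 + a % 2
--     return go(abs(n))
-- ===== Notes on version B (the rewrite author's own statement) =====
-- stated objective: simpler
-- what changed: Replaced A's three-phase pipeline (collect remainder bits into a list, reverse it with a hand-written index loop, then Horner-fold to a decimal number) by one direct recursion that halves the argument, recurses, shifts the result one decimal place and adds the current bit -- no list, no reverse, no fold.
import Mathlib
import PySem

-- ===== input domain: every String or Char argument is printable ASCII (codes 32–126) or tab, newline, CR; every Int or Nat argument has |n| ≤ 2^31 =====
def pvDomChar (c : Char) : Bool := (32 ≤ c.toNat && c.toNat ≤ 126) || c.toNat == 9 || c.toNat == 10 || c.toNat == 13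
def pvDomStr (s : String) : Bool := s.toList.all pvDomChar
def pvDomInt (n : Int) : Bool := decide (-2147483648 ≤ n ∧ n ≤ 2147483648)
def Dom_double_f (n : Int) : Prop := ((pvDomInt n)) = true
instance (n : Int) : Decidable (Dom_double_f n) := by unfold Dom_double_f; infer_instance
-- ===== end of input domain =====

-- B replaces A's collect-bits/reverse/decimal-fold pipeline by a single direct recursion (simpler, no lists).

-- ===== PORT A =====
-- while a > 1: append a % 2; a //= 2   then append a   (LSB-first bit list)
def double_f_loop (a : Int) (new_list : List Int) : List Int :=
  if a > 1 then
    double_f_loop (PySem.Int.floordiv a 2) (new_list ++ [PySem.Int.mod a 2])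
  else new_list ++ [a]
termination_by a.toNat
decreasing_by
  rw [PySem.Int.floordiv_eq_ediv_of_pos (by omega : (0:Int) < 2)]; omega

-- A's helper `reverse`: indexes list1[len_l - 1 - i] for i in range(len_l); the
-- index is always in range, so the .getD 0 default of pyGet? is never used.
def pyreverse (list1 : List Int) : List Int :=
  let len_l : Int := list1.length
  (PySem.List.pyRange 0 len_l 1).foldl
    (fun n_list i => n_list ++ [(PySem.List.pyGet? list1 (len_l - 1 - i)).getD 0]) []

def double_f (n : Int) : Int :=
  let new_list := double_f_loop |n| []
  let arr := pyreverse new_list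
  arr.foldl (fun res i => res * 10 + i) 0

-- ===== PORT B =====
def double_f_go (a : Int) : Int :=
  if a < 2 then a
  else double_f_go (PySem.Int.floordiv a 2) * 10 + PySem.Int.mod a 2
termination_by a.toNat
decreasing_by
  rw [PySem.Int.floordiv_eq_ediv_of_pos (by omega : (0:Int) < 2)]; omega

def double_f_alt (n : Int) : Int := double_f_go |n|

-- ===== PRECONDITION & SPEC =====
def Spec_double_f (n : Int) (out : Int) : Prop := out = double_f_alt n
instance (n : Int) (out : Int) : Decidable (Spec_double_f n out) := by unfold Spec_double_f; infer_instance

-- ===== CLAIM (what is proved, stated in full; the proofs are below) =====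
def Claim_equal_double_f : Prop := ∀ (n : Int), Dom_double_f n → Spec_double_f n (double_f n)

-- ===== LEMMAS AND PROOFS =====

-- the loop only ever appends to its accumulator
theorem double_f_loop_append (a : Int) (acc : List Int) :
    double_f_loop a acc = acc ++ double_f_loop a [] := by
  induction hk : a.toNat using Nat.strong_induction_on generalizing a acc with
  | _ k ih =>
    subst hk
    rw [double_f_loop]
    conv_rhs => rw [double_f_loop]
    split_ifs with h
    · have hlt : (PySem.Int.floordiv a 2).toNat < a.toNat := by
        rw [PySem.Int.floordiv_eq_ediv_of_pos (by omega : (0:Int) < 2)]; omega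
      rw [ih _ hlt _ _ rfl]
      simp only [List.nil_append]
      rw [ih _ hlt _ [PySem.Int.mod a 2] rfl]
      simp
    · simp

-- A's hand-written reverse is List.reverse
theorem pyreverse_eq_reverse (l : List Int) : pyreverse l = l.reverse := by
  unfold pyreverse
  rw [PySem.List.foldl_append_singleton_eq_map, List.nil_append]
  apply List.ext_getElem
  · simp [PySem.List.length_pyRange_one]
  · intro i h1 h2
    have hi : i < l.length := by
      simpa [PySem.List.length_pyRange_one] using h1
    rw [List.getElem_map, List.getElem_reverse,
      PySem.List.getElem_pyRange_one]
    rw [PySem.List.pyGet?_eq_some_getElem l (by omega)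
      (by omega)]
    simp

-- A's reversed bit list, read as a decimal number, is B's recursion
theorem fold_reverse_loop (a : Int) (ha : 0 ≤ a) :
    ((double_f_loop a []).reverse).foldl (fun res i => res * 10 + i) 0
      = double_f_go a := by
  induction a using double_f_go.induct with
  | case1 a h =>
      rw [double_f_loop, if_neg (by omega), double_f_go, if_pos h]
      simp
  | case2 a h ih =>
      have h2 : a > 1 := by omega
      have hfd : 0 ≤ PySem.Int.floordiv a 2 := by
        rw [PySem.Int.floordiv_eq_ediv_of_pos (by omega : (0:Int) < 2)]; omega
      rw [double_f_loop, if_pos h2, double_f_loop_append, double_f_go,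
        if_neg h]
      simp only [List.reverse_append, List.foldl_append]
      rw [ih hfd]
      simp

-- ===== VERDICT (by name: the statement is the Claim_ definition above) =====
theorem double_f_spec : Claim_equal_double_f := by
  intro n _
  simp only [Spec_double_f, double_f, double_f_alt]
  rw [pyreverse_eq_reverse]
  exact fold_reverse_loop |n| (abs_nonneg n)
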